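-- pv_equiv track=rewrite | github.com/james5635/GeekForGeek-Data-Structure-and-Algorithm | searching/array_properties/find_partition_point/solution.py | find_partition_point_optimized
-- ===== SOURCE A (Python) =====
-- def find_partition_point_optimized(arr):
--     """
--     Find partition point with O(n) space (similar to main function).
--
--     Time Complexity: O(n)
--     Space Complexity: O(n) - using arrays for clarity
--
--     Args:
--         arr: Array of integers
--
--     Returns:
--         Index of partition point, or -1 if not found
--     """
--     n = len(arr)
--
--     if n < 3:
--         return -1
--
--     # max_left[i] = maximum element from arr[0] to arr[i]
--     max_left = [0] * n
--     max_left[0] = arr[0]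
--     for i in range(1, n):
--         max_left[i] = max(max_left[i - 1], arr[i])
--
--     # min_right[i] = minimum element from arr[i] to arr[n-1]
--     min_right = [0] * n
--     min_right[n - 1] = arr[n - 1]
--     for i in range(n - 2, -1, -1):
--         min_right[i] = min(min_right[i + 1], arr[i])
--
--     # Find partition point (excluding first and last elements)
--     for i in range(1, n - 1):
--         if max_left[i - 1] < arr[i] < min_right[i + 1]:
--             return i
--
--     return -1
--
--     # Compute min from right in O(n) time, O(1) space
--     # We traverse from right and check each position
--     # For O(1) space, we need to precompute right min differently
--
--     # First, find overall min from right for each position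
--     # We do two passes: one to find min from right, one to find partition
--     # But for true O(1) space, we'd need to recalculate, so let's use
--     # a simpler approach with single pass from right
--
--     # Actually, let's use a different O(1) space approach:
--     # Find the leftmost position where all left elements are smaller
--     # and all right elements are greater
--
--     # First pass: track max so far
--     max_so_far = [arr[0]] * n
--     for i in range(1, n):
--         max_so_far[i] = max(max_so_far[i - 1], arr[i])
--
--     # Second pass: from right, check if current is partition
--     min_from_right = float("inf")
--     for i in range(n - 1, 0, -1):
--         if max_so_far[i - 1] < arr[i] < min_from_right:
--             return i
--         min_from_right = min(min_from_right, arr[i])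
--
--     return -1
-- ===== SOURCE B (Python) =====
-- def find_partition_point_optimized(arr):
--     """Brute-force check straight from the definition: for each interior index i,
--     verify directly that every earlier element is smaller and every later element
--     is larger; no auxiliary prefix/suffix tables are built."""
--     n = len(arr)
--     if n < 3:
--         return -1
--     for i in range(1, n - 1):
--         if all(x < arr[i] for x in arr[:i]) and all(arr[i] < x for x in arr[i + 1:]):
--             return i
--     return -1
-- ===== Notes on version B (the rewrite author's own statement) =====
-- stated objective: simpler
-- what changed: Drops A's precomputed prefix-max and suffix-min tables entirely and instead checks the partition-point definition directly at each interior index by scanning its prefix and suffix (naive quadratic check instead of two linear precomputation passes).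
import Mathlib
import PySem

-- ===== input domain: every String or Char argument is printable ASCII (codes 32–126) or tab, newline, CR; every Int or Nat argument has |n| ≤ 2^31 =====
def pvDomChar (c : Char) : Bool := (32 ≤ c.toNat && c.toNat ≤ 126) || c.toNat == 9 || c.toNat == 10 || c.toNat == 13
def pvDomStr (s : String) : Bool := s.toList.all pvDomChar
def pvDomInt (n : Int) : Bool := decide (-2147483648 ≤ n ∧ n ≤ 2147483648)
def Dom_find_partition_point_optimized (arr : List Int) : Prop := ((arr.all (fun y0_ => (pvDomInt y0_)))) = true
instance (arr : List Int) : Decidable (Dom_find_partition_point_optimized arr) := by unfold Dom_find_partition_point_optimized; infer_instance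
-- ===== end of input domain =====

-- B drops A's precomputed prefix-max and suffix-min tables and checks the
-- partition-point definition directly at each interior index by scanning its
-- prefix and suffix (naive quadratic check; simpler, not faster).

-- ===== PORT A =====
-- All indices A uses (0, n-1, i-1, i, i+1 for the loop ranges shown) are in range,
-- so Python's arr[...] is exactly pyGetD/pySetD here (never the default branch).
-- 'for i in range(1, n-1): if max_left[i-1] < arr[i] < min_right[i+1]: return i' then 'return -1'
def pvLoopA (arr maxl minr : List Int) : List Int → Int
  | [] => -1
  | i :: rest =>
    if PySem.List.pyGetD maxl (i - 1) 0 < PySem.List.pyGetD arr i 0 ∧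
        PySem.List.pyGetD arr i 0 < PySem.List.pyGetD minr (i + 1) 0 then i
    else pvLoopA arr maxl minr rest

def find_partition_point_optimized (arr : List Int) : Int :=
  let n : Int := PySem.List.len arr
  if n < 3 then -1
  else
    let max_left : List Int := List.replicate arr.length (0 : Int)
    let max_left := PySem.List.pySetD max_left 0 (PySem.List.pyGetD arr 0 0)
    let max_left := (PySem.List.pyRange 1 n 1).foldl
        (fun ml i => PySem.List.pySetD ml i
          (max (PySem.List.pyGetD ml (i - 1) 0) (PySem.List.pyGetD arr i 0))) max_left
    let min_right : List Int := List.replicate arr.length (0 : Int)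
    let min_right := PySem.List.pySetD min_right (n - 1) (PySem.List.pyGetD arr (n - 1) 0)
    let min_right := (PySem.List.pyRange (n - 2) (-1) (-1)).foldl
        (fun mr i => PySem.List.pySetD mr i
          (min (PySem.List.pyGetD mr (i + 1) 0) (PySem.List.pyGetD arr i 0))) min_right
    pvLoopA arr max_left min_right (PySem.List.pyRange 1 (n - 1) 1)

-- ===== PORT B =====
-- 'for i in range(1, n-1): if all(x < arr[i] for x in arr[:i]) and
--    all(arr[i] < x for x in arr[i+1:]): return i' then 'return -1'
def pvLoopB (arr : List Int) : List Int → Int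
  | [] => -1
  | i :: rest =>
    let ai := PySem.List.pyGetD arr i 0
    if (PySem.List.slice arr none (some i)).all (fun x => x < ai) &&
        (PySem.List.slice arr (some (i + 1)) none).all (fun x => ai < x) then i
    else pvLoopB arr rest

def find_partition_point_optimized_alt (arr : List Int) : Int :=
  let n : Int := PySem.List.len arr
  if n < 3 then -1
  else pvLoopB arr (PySem.List.pyRange 1 (n - 1) 1)

-- ===== PRECONDITION & SPEC =====
def Spec_find_partition_point_optimized (arr : List Int) (out : Int) : Prop := out = find_partition_point_optimized_alt arr
instance (arr : List Int) (out : Int) : Decidable (Spec_find_partition_point_optimized arr out) := by unfold Spec_find_partition_point_optimized; infer_instance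

-- ===== CLAIM (what is proved, stated in full; the proofs are below) =====
def Claim_equal_find_partition_point_optimized : Prop := ∀ (arr : List Int), Dom_find_partition_point_optimized arr → Spec_find_partition_point_optimized arr (find_partition_point_optimized arr)

-- ===== LEMMAS AND PROOFS =====

-- prefix maximum of arr[0..k] and suffix minimum of arr[k..]
def pvPM (arr : List Int) : Nat → Int
  | 0 => arr.getD 0 0
  | k + 1 => max (pvPM arr k) (arr.getD (k + 1) 0)

def pvSM (arr : List Int) (k : Nat) : Int :=
  if h : k + 1 < arr.length then min (arr.getD k 0) (pvSM arr (k + 1)) else arr.getD k 0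
  termination_by arr.length - k
  decreasing_by omega

-- the partition-point test at index i
def pvP (arr : List Int) (i : Int) : Bool :=
  decide (pvPM arr (i - 1).toNat < arr.getD i.toNat 0 ∧ arr.getD i.toNat 0 < pvSM arr (i + 1).toNat)

lemma pvGetD_int (xs : List Int) (i : Int) (h : 0 ≤ i) :
    PySem.List.pyGetD xs i 0 = xs.getD i.toNat 0 := by
  have hi : i = ((i.toNat : Nat) : Int) := (Int.toNat_of_nonneg h).symm
  have h2 : (((i.toNat : Nat) : Int)).toNat = i.toNat := by omega
  rw [hi, PySem.List.pyGetD_natCast, h2]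

lemma pvGetD_map_range (f : Nat → Int) (n : Nat) (i : Int) (h0 : 0 ≤ i) (h : i < (n : Int)) :
    PySem.List.pyGetD ((List.range n).map f) i 0 = f i.toNat := by
  rw [pvGetD_int _ _ h0]
  have hn : i.toNat < n := by omega
  rw [List.getD_eq_getElem?_getD]
  simp [hn]

lemma pvFind?_congr {α : Type} (l : List α) (p q : α → Bool) (h : ∀ x ∈ l, p x = q x) :
    l.find? p = l.find? q := by
  induction l with
  | nil => rfl
  | cons x xs ih =>
    simp only [List.find?_cons]
    rw [h x (by simp)]
    cases hq : q x
    · simpa using ih (fun y hy => h y (by simp [hy]))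
    · rfl

lemma pvLoopA_eq (arr maxl minr : List Int) (l : List Int) :
    pvLoopA arr maxl minr l
    = (l.find? (fun i =>
        decide (PySem.List.pyGetD maxl (i - 1) 0 < PySem.List.pyGetD arr i 0 ∧
          PySem.List.pyGetD arr i 0 < PySem.List.pyGetD minr (i + 1) 0))).getD (-1) := by
  induction l with
  | nil => rfl
  | cons x rest ih =>
    simp only [pvLoopA, List.find?_cons]
    by_cases hx : PySem.List.pyGetD maxl (x - 1) 0 < PySem.List.pyGetD arr x 0 ∧
        PySem.List.pyGetD arr x 0 < PySem.List.pyGetD minr (x + 1) 0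
    · rw [if_pos hx]
      simp [hx]
    · rw [if_neg hx]
      rw [decide_eq_false hx]
      simpa using ih

lemma pvLoopB_eq (arr : List Int) (l : List Int) :
    pvLoopB arr l
    = (l.find? (fun i =>
        (PySem.List.slice arr none (some i)).all (fun x => x < PySem.List.pyGetD arr i 0) &&
        (PySem.List.slice arr (some (i + 1)) none).all
          (fun x => PySem.List.pyGetD arr i 0 < x))).getD (-1) := by
  induction l with
  | nil => rfl
  | cons x rest ih =>
    simp only [pvLoopB, List.find?_cons]
    cases hx : (PySem.List.slice arr none (some x)).all
          (fun y => y < PySem.List.pyGetD arr x 0) &&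
        (PySem.List.slice arr (some (x + 1)) none).all
          (fun y => PySem.List.pyGetD arr x 0 < y)
    · simpa using ih
    · simp

lemma pvMaxLeft (arr : List Int) (m : Nat) (h1 : 1 ≤ m) (h2 : m ≤ arr.length) :
    (PySem.List.pyRange (m : Int) ((arr.length : Int)) 1).foldl
      (fun ml i => PySem.List.pySetD ml i
        (max (PySem.List.pyGetD ml (i - 1) 0) (PySem.List.pyGetD arr i 0)))
      ((List.range m).map (pvPM arr) ++ List.replicate (arr.length - m) 0)
    = (List.range arr.length).map (pvPM arr) := by
  induction hk : arr.length - m generalizing m with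
  | zero =>
    have hm : m = arr.length := by omega
    subst hm
    rw [PySem.List.pyRange_one_eq_nil (by omega)]
    simp
  | succ k ih =>
    have hlt : m < arr.length := by omega
    rw [PySem.List.pyRange_one_cons (by exact_mod_cast hlt), List.foldl_cons]
    rw [show (k + 1) = arr.length - m from hk.symm]
    have hgetml : PySem.List.pyGetD
        ((List.range m).map (pvPM arr) ++ List.replicate (arr.length - m) 0) ((m : Int) - 1) 0
        = pvPM arr (m - 1) := by
      have h1' : ((m : Int) - 1) = (((m - 1 : Nat)) : Int) := by omega
      rw [h1', PySem.List.pyGetD_natCast, List.getD_eq_getElem?_getD,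
        List.getElem?_append_left (by simp; omega)]
      simp [(by omega : m - 1 < m)]
    have hgetarr : PySem.List.pyGetD arr (m : Int) 0 = arr.getD m 0 :=
      PySem.List.pyGetD_natCast ..
    have hv : max (pvPM arr (m - 1)) (arr.getD m 0) = pvPM arr m := by
      have hm' : m = (m - 1) + 1 := by omega
      rw [hm']
      simp only [pvPM]
      rw [← hm']
    have hset : PySem.List.pySetD
        ((List.range m).map (pvPM arr) ++ List.replicate (arr.length - m) 0) (m : Int) (pvPM arr m)
        = (List.range (m + 1)).map (pvPM arr) ++ List.replicate (arr.length - (m + 1)) 0 := by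
      rw [PySem.List.pySetD_natCast, List.set_append_right _ _ (by simp)]
      have hrep : List.replicate (arr.length - m) (0 : Int)
          = 0 :: List.replicate (arr.length - (m + 1)) 0 := by
        rw [← List.replicate_succ]
        congr 1
        omega
      rw [hrep]
      simp [List.range_succ]
    rw [hgetml, hgetarr, hv, hset]
    have hc1 : (m : Int) + 1 = ((m + 1 : Nat) : Int) := by push_cast; ring
    have hc2 : arr.length - (m + 1) = k := by omega
    rw [hc1, hc2]
    exact ih (m + 1) (by omega) (by omega) (by omega)

lemma pvMinRight (arr : List Int) (t : Nat) (h2 : t ≤ arr.length - 1) (h3 : 3 ≤ arr.length) :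
    (PySem.List.pyRange ((t : Int) - 1) (-1) (-1)).foldl
      (fun mr i => PySem.List.pySetD mr i
        (min (PySem.List.pyGetD mr (i + 1) 0) (PySem.List.pyGetD arr i 0)))
      (List.replicate t 0 ++ (List.range (arr.length - t)).map (fun k => pvSM arr (t + k)))
    = (List.range arr.length).map (pvSM arr) := by
  induction t with
  | zero =>
    rw [PySem.List.pyRange_neg_one_eq_nil (by omega)]
    simp
  | succ t ih =>
    have ht1 : t + 1 < arr.length := by omega
    have hc : ((t + 1 : Nat) : Int) - 1 = (t : Nat) := by push_cast; ring
    rw [hc, PySem.List.pyRange_neg_one_cons (by omega), List.foldl_cons]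
    have hgetmr : PySem.List.pyGetD
        (List.replicate (t + 1) 0 ++ (List.range (arr.length - (t + 1))).map
          (fun k => pvSM arr (t + 1 + k))) ((t : Int) + 1) 0
        = pvSM arr (t + 1) := by
      have h1' : ((t : Int) + 1) = (((t + 1 : Nat)) : Int) := by push_cast; ring
      rw [h1', PySem.List.pyGetD_natCast, List.getD_eq_getElem?_getD,
        List.getElem?_append_right (by simp)]
      have hlen : (0 : Nat) < arr.length - (t + 1) := by omega
      simp [hlen]
    have hgetarr : PySem.List.pyGetD arr (t : Int) 0 = arr.getD t 0 :=
      PySem.List.pyGetD_natCast ..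
    have hv : min (pvSM arr (t + 1)) (arr.getD t 0) = pvSM arr t := by
      conv_rhs => rw [pvSM]
      rw [dif_pos ht1, min_comm]
    have hset : PySem.List.pySetD
        (List.replicate (t + 1) 0 ++ (List.range (arr.length - (t + 1))).map
          (fun k => pvSM arr (t + 1 + k))) (t : Int) (pvSM arr t)
        = List.replicate t 0 ++ (List.range (arr.length - t)).map (fun k => pvSM arr (t + k)) := by
      rw [PySem.List.pySetD_natCast, List.replicate_succ', List.append_assoc,
        List.set_append_right _ _ (by simp)]
      have hrt : arr.length - t = (arr.length - (t + 1)) + 1 := by omega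
      rw [hrt, List.range_succ_eq_map, List.map_cons, List.map_map]
      simp only [List.length_replicate, Nat.sub_self, List.singleton_append, List.set_cons_zero]
      refine congrArg (fun l => List.replicate t (0 : Int) ++ l) ?_
      congr 1
      apply List.map_congr_left
      intro a _
      simp only [Function.comp_apply]
      congr 1
      omega
    rw [hgetmr, hgetarr, hv, hset]
    exact ih (by omega)

-- the prefix all-scan is the prefix-max test
lemma pvTakeAll (arr : List Int) (v : Int) (k : Nat) (hk : k < arr.length) :
    (arr.take (k + 1)).all (fun x => x < v) = decide (pvPM arr k < v) := by
  induction k with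
  | zero =>
    cases arr with
    | nil => simp at hk
    | cons a rest => simp [pvPM]
  | succ k ih =>
    rw [List.take_add_one, List.all_append, ih (by omega)]
    have hget : arr[k + 1]?.toList = [arr.getD (k + 1) 0] := by
      rw [List.getD_eq_getElem?_getD]
      simp [hk]
    rw [hget]
    simp only [pvPM, List.all_cons, List.all_nil, Bool.and_true]
    rw [Bool.eq_iff_iff]
    simp

-- the suffix all-scan is the suffix-min test
lemma pvDropAll (arr : List Int) (v : Int) (k : Nat) (hk : k < arr.length) :
    (arr.drop k).all (fun x => v < x) = decide (v < pvSM arr k) := by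
  induction hd : arr.length - k generalizing k with
  | zero => omega
  | succ d ih =>
    rw [List.drop_eq_getElem_cons hk, List.all_cons]
    rw [pvSM]
    by_cases h1 : k + 1 < arr.length
    · rw [dif_pos h1, ih (k + 1) h1 (by omega)]
      have hg : arr[k] = arr.getD k 0 := by
        rw [List.getD_eq_getElem?_getD]
        simp [hk]
      rw [hg, Bool.eq_iff_iff]
      simp
    · rw [dif_neg h1]
      have hdrop : arr.drop (k + 1) = [] := by
        apply List.drop_eq_nil_of_le
        omega
      have hg : arr[k] = arr.getD k 0 := by
        rw [List.getD_eq_getElem?_getD]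
        simp [hk]
      rw [hdrop, hg]
      simp

-- ===== VERDICT (by name: the statement is the Claim_ definition above) =====
theorem find_partition_point_optimized_spec : Claim_equal_find_partition_point_optimized := by
  intro arr _
  unfold Spec_find_partition_point_optimized
  simp only [find_partition_point_optimized, find_partition_point_optimized_alt,
    PySem.List.len_eq]
  by_cases h3 : (arr.length : Int) < 3
  · rw [if_pos h3, if_pos h3]
  · rw [if_neg h3, if_neg h3]
    have hlen : 3 ≤ arr.length := by omega
    -- A side: the two tables
    have hml0 : PySem.List.pySetD (List.replicate arr.length (0 : Int)) 0
        (PySem.List.pyGetD arr 0 0)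
        = (List.range 1).map (pvPM arr) ++ List.replicate (arr.length - 1) 0 := by
      have h0 : PySem.List.pySetD (List.replicate arr.length (0 : Int)) 0
          (PySem.List.pyGetD arr 0 0)
          = (List.replicate arr.length (0 : Int)).set (0 : Int).toNat
            (PySem.List.pyGetD arr 0 0) := PySem.List.pySetD_of_nonneg _ _ (by norm_num)
      rw [h0,
        show List.replicate arr.length (0 : Int) = 0 :: List.replicate (arr.length - 1) 0 from by
          rw [← List.replicate_succ]; congr 1; omega]
      simp [pvPM, PySem.List.pyGetD_zero]
    rw [hml0]
    have hml := pvMaxLeft arr 1 le_rfl (by omega)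
    rw [show ((1 : Nat) : Int) = 1 from rfl] at hml
    rw [hml]
    have hmr0 : PySem.List.pySetD (List.replicate arr.length (0 : Int)) ((arr.length : Int) - 1)
        (PySem.List.pyGetD arr ((arr.length : Int) - 1) 0)
        = List.replicate (arr.length - 1) 0 ++ (List.range (arr.length - (arr.length - 1))).map
          (fun k => pvSM arr ((arr.length - 1) + k)) := by
      have e1 : ((arr.length : Int) - 1) = ((arr.length - 1 : Nat) : Int) := by omega
      rw [e1, PySem.List.pySetD_natCast, PySem.List.pyGetD_natCast,
        show List.replicate arr.length (0 : Int)
            = List.replicate (arr.length - 1) 0 ++ [0] from by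
          rw [← List.replicate_succ']; congr 1; omega,
        List.set_append_right _ _ (by simp),
        show arr.length - (arr.length - 1) = 1 from by omega]
      simp only [List.length_replicate, Nat.sub_self, List.set_cons_zero, List.range_one,
        List.map_cons, List.map_nil]
      have e3 : pvSM arr (arr.length - 1 + 0) = arr.getD (arr.length - 1) 0 := by
        rw [pvSM, dif_neg (by omega)]
        norm_num
      rw [e3]
    rw [hmr0]
    have hmr := pvMinRight arr (arr.length - 1) (by omega) hlen
    rw [show ((arr.length - 1 : Nat) : Int) - 1 = (arr.length : Int) - 2 from by omega] at hmr
    rw [hmr]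
    have hpredA : ∀ i ∈ PySem.List.pyRange 1 ((arr.length : Int) - 1) 1,
        (fun i => decide
          (PySem.List.pyGetD ((List.range arr.length).map (pvPM arr)) (i - 1) 0 <
              PySem.List.pyGetD arr i 0 ∧
            PySem.List.pyGetD arr i 0 <
              PySem.List.pyGetD ((List.range arr.length).map (pvSM arr)) (i + 1) 0)) i
        = pvP arr i := by
      intro i hi
      obtain ⟨hi1, hi2⟩ := PySem.List.mem_pyRange_one.mp hi
      simp only []
      rw [pvGetD_map_range (pvPM arr) arr.length (i - 1) (by omega) (by omega),
        pvGetD_map_range (pvSM arr) arr.length (i + 1) (by omega) (by omega),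
        pvGetD_int arr i (by omega)]
      rfl
    rw [pvLoopA_eq, pvFind?_congr _ _ _ hpredA]
    -- B side: the direct prefix/suffix scans
    have hpredB : ∀ i ∈ PySem.List.pyRange 1 ((arr.length : Int) - 1) 1,
        (fun i =>
          (PySem.List.slice arr none (some i)).all (fun x => x < PySem.List.pyGetD arr i 0) &&
          (PySem.List.slice arr (some (i + 1)) none).all
            (fun x => PySem.List.pyGetD arr i 0 < x)) i
        = pvP arr i := by
      intro i hi
      obtain ⟨hi1, hi2⟩ := PySem.List.mem_pyRange_one.mp hi
      simp only []
      rw [PySem.List.slice_to _ (by omega : (0:Int) ≤ i),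
        PySem.List.slice_from _ (by omega : (0:Int) ≤ i + 1),
        pvGetD_int arr i (by omega)]
      have ht : i.toNat = (i - 1).toNat + 1 := by omega
      rw [ht, pvTakeAll arr _ ((i - 1).toNat) (by omega), ← ht,
        pvDropAll arr _ ((i + 1).toNat) (by omega)]
      simp [pvP]
    rw [pvLoopB_eq, pvFind?_congr _ _ _ hpredB]
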